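-- pv_equiv track=rewrite | github.com/sotoseattle/Dimwit | examples/genes/gen_BN_decoup.py | genes2Alleles
-- ===== SOURCE A (Python) =====
-- def genes2Alleles(numAlleles):
--     '''mapping from the number of alleles to the index position in a sequential array
--        [0,0] => 0, [0,1] => 1, [1,0] => 1, [1,1] =>2'''
--     sol = {}
--     count = 0
--     for i in range(numAlleles):
--         for j in range(i, numAlleles):
--             sol[(i,j)] = count
--             count +=1
--     return sol
-- ===== SOURCE B (Python) =====
-- def genes2Alleles(numAlleles):
--     '''mapping from the number of alleles to the index position in a sequential array'''
--     return {(i, j): i * numAlleles - i * (i - 1) // 2 + (j - i)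
--             for i in range(numAlleles)
--             for j in range(i, numAlleles)}
-- ===== Notes on version B (the rewrite author's own statement) =====
-- stated objective: simpler
-- what changed: The threaded running counter is eliminated: each pair gets its index from a closed-form triangular-number offset, so the dict is built by a single stateless comprehension.
import Mathlib
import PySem

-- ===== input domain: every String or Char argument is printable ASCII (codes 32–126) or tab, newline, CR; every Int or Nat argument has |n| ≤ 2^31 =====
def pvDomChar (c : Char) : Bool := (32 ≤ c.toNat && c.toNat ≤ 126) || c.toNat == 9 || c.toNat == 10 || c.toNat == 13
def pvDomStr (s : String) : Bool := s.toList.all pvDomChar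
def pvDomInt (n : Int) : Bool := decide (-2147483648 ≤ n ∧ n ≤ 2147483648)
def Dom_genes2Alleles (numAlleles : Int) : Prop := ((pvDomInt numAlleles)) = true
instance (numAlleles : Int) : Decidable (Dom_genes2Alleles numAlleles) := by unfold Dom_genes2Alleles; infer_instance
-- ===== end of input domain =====

-- B replaces A's threaded running counter by a closed-form triangular index per pair (simpler, no mutable state).

-- ===== PORT A =====
-- dict sol over keys (i,j) with the running count; returned as its items list of triples
def genes2Alleles (numAlleles : Int) : List (Int × Int × Int) :=
  (((PySem.List.pyRange 0 numAlleles 1).foldl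
      (fun (st : PySem.Dict (Int × Int) Int × Int) i =>
        (PySem.List.pyRange i numAlleles 1).foldl
          (fun st j => (st.1.insert (i, j) st.2, st.2 + 1)) st)
      (PySem.Dict.empty, 0)).1.items).map (fun p => (p.1.1, p.1.2, p.2))

-- ===== PORT B =====
-- dict comprehension with the closed-form index; items in comprehension order
def genes2Alleles_alt (numAlleles : Int) : List (Int × Int × Int) :=
  (PySem.List.pyRange 0 numAlleles 1).flatMap
    (fun i => (PySem.List.pyRange i numAlleles 1).map
      (fun j => (i, j, i * numAlleles - PySem.Int.floordiv (i * (i - 1)) 2 + (j - i))))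

-- ===== PRECONDITION & SPEC =====
def Spec_genes2Alleles (numAlleles : Int) (out : List (Int × Int × Int)) : Prop := out = genes2Alleles_alt numAlleles
instance (numAlleles : Int) (out : List (Int × Int × Int)) : Decidable (Spec_genes2Alleles numAlleles out) := by unfold Spec_genes2Alleles; infer_instance

-- ===== CLAIM (what is proved, stated in full; the proofs are below) =====
def Claim_equal_genes2Alleles : Prop := ∀ (numAlleles : Int), Dom_genes2Alleles numAlleles → Spec_genes2Alleles numAlleles (genes2Alleles numAlleles)

-- ===== LEMMAS AND PROOFS =====

-- (i+1)*i // 2 grows by i over i*(i-1) // 2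
lemma floordiv_tri_step (i : Int) :
    PySem.Int.floordiv ((i + 1) * i) 2 = PySem.Int.floordiv (i * (i - 1)) 2 + i := by
  obtain ⟨t, ht⟩ := Int.even_mul_succ_self (i - 1)
  have h1 : i * (i - 1) = 2 * t := by linear_combination ht
  have h2 : (i + 1) * i = 2 * (t + i) := by linear_combination h1
  have hA : PySem.Int.floordiv (2 * t) 2 = t := by
    rw [PySem.Int.floordiv_eq_iff_of_pos (by omega)]; omega
  have hB : PySem.Int.floordiv (2 * (t + i)) 2 = t + i := by
    rw [PySem.Int.floordiv_eq_iff_of_pos (by omega)]; omega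
  rw [h1, h2, hA, hB]

-- the inner loop: appends fresh keys (i, j) with consecutive counts, and advances the count
lemma inner_fold (i n : Int) (k : Nat) :
    ∀ (a : Int), (n - a).toNat = k →
    ∀ (st : PySem.Dict (Int × Int) Int × Int),
    (∀ j : Int, a ≤ j → st.1.contains (i, j) = false) →
    ((PySem.List.pyRange a n 1).foldl
        (fun st j => (st.1.insert (i, j) st.2, st.2 + 1)) st).1.items
      = st.1.items ++ (PySem.List.pyRange a n 1).map (fun j => ((i, j), st.2 + (j - a)))
    ∧ ((PySem.List.pyRange a n 1).foldl
        (fun st j => (st.1.insert (i, j) st.2, st.2 + 1)) st).2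
      = st.2 + ((n - a).toNat : Int) := by
  induction k with
  | zero =>
    intro a ha st _
    rw [PySem.List.pyRange_one_eq_nil (by omega)]
    refine ⟨by simp, ?_⟩
    simp [ha]
  | succ k ih =>
    intro a ha st hfresh
    have hlt : a < n := by omega
    rw [PySem.List.pyRange_one_cons hlt]
    simp only [List.foldl_cons, List.map_cons]
    have hca : st.1.contains (i, a) = false := hfresh a le_rfl
    have hfresh' : ∀ j : Int, a + 1 ≤ j →
        (st.1.insert (i, a) st.2, st.2 + 1).1.contains (i, j) = false := by
      intro j hj
      dsimp only
      rw [PySem.Dict.contains_insert]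
      have hne : ((i, j) == (i, a)) = false := by
        simp only [beq_eq_false_iff_ne, ne_eq, Prod.mk.injEq, not_and]
        intro _
        omega
      simp [hne, hfresh j (by omega)]
    obtain ⟨h1, h2⟩ := ih (a + 1) (by omega) (st.1.insert (i, a) st.2, st.2 + 1) hfresh'
    have hmapeq :
        (PySem.List.pyRange (a + 1) n 1).map
            (fun j => ((i, j), (st.1.insert (i, a) st.2, st.2 + 1).2 + (j - (a + 1))))
          = (PySem.List.pyRange (a + 1) n 1).map (fun j => ((i, j), st.2 + (j - a))) := by
      apply List.map_congr_left
      intro j hj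
      rw [PySem.List.mem_pyRange_one] at hj
      dsimp only
      simp only [Prod.mk.injEq, true_and]
      omega
    constructor
    · rw [h1, hmapeq]
      dsimp only
      rw [PySem.Dict.items_insert_of_not_contains _ _ hca, List.append_assoc,
        List.singleton_append]
      norm_num
    · rw [h2]
      dsimp only
      omega

-- the outer loop up to m: items are the closed-form triangle, the count is the triangle size
lemma outer_fold (n : Int) (m : Nat) (hm : (m : Int) ≤ n) :
    ((PySem.List.pyRange 0 (m : Int) 1).foldl
        (fun (st : PySem.Dict (Int × Int) Int × Int) i =>
          (PySem.List.pyRange i n 1).foldl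
            (fun st j => (st.1.insert (i, j) st.2, st.2 + 1)) st)
        (PySem.Dict.empty, 0)).1.items
      = (PySem.List.pyRange 0 (m : Int) 1).flatMap
          (fun i => (PySem.List.pyRange i n 1).map
            (fun j => ((i, j), i * n - PySem.Int.floordiv (i * (i - 1)) 2 + (j - i))))
    ∧ ((PySem.List.pyRange 0 (m : Int) 1).foldl
        (fun (st : PySem.Dict (Int × Int) Int × Int) i =>
          (PySem.List.pyRange i n 1).foldl
            (fun st j => (st.1.insert (i, j) st.2, st.2 + 1)) st)
        (PySem.Dict.empty, 0)).2
      = (m : Int) * n - PySem.Int.floordiv ((m : Int) * ((m : Int) - 1)) 2 := by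
  induction m with
  | zero =>
    rw [show ((0 : Nat) : Int) = 0 from rfl,
        PySem.List.pyRange_one_eq_nil (le_refl (0 : Int))]
    simp only [List.foldl_nil, List.flatMap_nil]
    refine ⟨rfl, ?_⟩
    have h0 : PySem.Int.floordiv ((0 : Int) * ((0 : Int) - 1)) 2 = 0 := by decide
    rw [h0]
    ring
  | succ m ih =>
    obtain ⟨ih1, ih2⟩ := ih (by push_cast at hm ⊢; omega)
    have hsplit : PySem.List.pyRange 0 ((m : Int) + 1) 1
        = PySem.List.pyRange 0 (m : Int) 1 ++ [(m : Int)] := by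
      have := PySem.List.pyRange_one_succ_right (a := 0) (b := (m : Int)) (by positivity)
      simpa using this
    have hcast : (((m + 1 : Nat)) : Int) = (m : Int) + 1 := by push_cast; ring
    rw [hcast, hsplit, List.foldl_append, List.flatMap_append]
    set r := (PySem.List.pyRange 0 (m : Int) 1).foldl
        (fun (st : PySem.Dict (Int × Int) Int × Int) i =>
          (PySem.List.pyRange i n 1).foldl
            (fun st j => (st.1.insert (i, j) st.2, st.2 + 1)) st)
        (PySem.Dict.empty, 0) with hr
    simp only [List.foldl_cons, List.foldl_nil]
    have hmn : (m : Int) < n := by push_cast at hm; omega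
    have hfresh : ∀ j : Int, (m : Int) ≤ j → r.1.contains ((m : Int), j) = false := by
      intro j hj
      rw [PySem.Dict.contains_eq_decide_mem_keys]
      simp only [decide_eq_false_iff_not, PySem.Dict.keys, ih1]
      intro hmem
      simp only [List.map_flatMap, List.map_map, List.mem_flatMap, List.mem_map,
        Function.comp] at hmem
      obtain ⟨i, hi, j', _, hij⟩ := hmem
      rw [PySem.List.mem_pyRange_one] at hi
      have hieq : i = (m : Int) := by
        have := congrArg Prod.fst hij; simpa using this
      omega
    obtain ⟨h1, h2⟩ := inner_fold (m : Int) n (n - (m : Int)).toNat (m : Int) rfl r hfresh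
    constructor
    · rw [h1, ih1, ih2]
      congr 1
      simp only [List.flatMap_cons, List.flatMap_nil, List.append_nil]
    · rw [h2, ih2]
      rw [show ((m : Int) + 1 - 1) = (m : Int) from by ring, floordiv_tri_step]
      have hto : ((n - (m : Int)).toNat : Int) = n - (m : Int) := by omega
      rw [hto]
      ring

-- ===== VERDICT (by name: the statement is the Claim_ definition above) =====
theorem genes2Alleles_spec : Claim_equal_genes2Alleles := by
  intro n _
  unfold Spec_genes2Alleles genes2Alleles genes2Alleles_alt
  by_cases hn : 0 ≤ n
  · have hcast : n = ((n.toNat : Nat) : Int) := (Int.toNat_of_nonneg hn).symm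
    rw [hcast]
    obtain ⟨h1, _⟩ := outer_fold ((n.toNat : Nat) : Int) n.toNat (le_refl _)
    rw [h1, List.map_flatMap]
    simp only [List.map_map]
    rfl
  · rw [PySem.List.pyRange_one_eq_nil (by omega)]
    simp only [List.foldl_nil, List.flatMap_nil]
    rfl
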